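-- pv_equiv track=rewrite | github.com/meteor-gogogo/python | data_ctr_to_redis/scripts/ctr_data_to_redis_day.py | get_cid_dict
-- ===== SOURCE A (Python) =====
-- def get_cid_dict(ctr_data, ctr_dict):
--     for row in ctr_data:
--         category_id = str(row['category_id'])
--         pv = row['pv_show']
--         click = row['pv_detail']
--         cid_click_key = 'gbdt:2:' + category_id + ':click'
--         cid_click_value_current = ctr_dict.get(cid_click_key, 0)
--         cid_click_value = click + cid_click_value_current
--         cid_pv_key = 'gbdt:2:' + category_id + ':pv'
--         cid_pv_value_current = ctr_dict.get(cid_pv_key, 0)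
--         cid_pv_value = pv + cid_pv_value_current
--         ctr_dict.update({cid_click_key: cid_click_value})
--         ctr_dict.update({cid_pv_key: cid_pv_value})
--     return ctr_dict
-- ===== SOURCE B (Python) =====
-- # B: key-level delta counting -- one pass builds a dict of per-key increments
-- # (keyed by the final 'gbdt:2:<cid>:click'/':pv' strings), then existing keys of
-- # ctr_dict absorb their deltas via pop and the leftover new keys are appended
-- # with one update; ctr_dict is mutated in place and returned, like A.
-- def get_cid_dict(ctr_data, ctr_dict):
--     delta = {}
--     for row in ctr_data:
--         cid = str(row['category_id'])
--         for suffix, field in ((':click', 'pv_detail'), (':pv', 'pv_show')):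
--             key = 'gbdt:2:' + cid + suffix
--             delta[key] = delta.get(key, 0) + row[field]
--     for key in ctr_dict:
--         ctr_dict[key] += delta.pop(key, 0)
--     ctr_dict.update(delta)
--     return ctr_dict
-- ===== Notes on version B (the rewrite author's own statement) =====
-- stated objective: alternative
-- what changed: A interleaves key building and read-modify-write of ctr_dict inside the row loop; B first counts all increments in a local dict keyed by the final 'gbdt:2:<cid>:click'/':pv' strings, then lets existing ctr_dict keys absorb their delta via pop and appends the leftover new keys with a single update.
import Mathlib
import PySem

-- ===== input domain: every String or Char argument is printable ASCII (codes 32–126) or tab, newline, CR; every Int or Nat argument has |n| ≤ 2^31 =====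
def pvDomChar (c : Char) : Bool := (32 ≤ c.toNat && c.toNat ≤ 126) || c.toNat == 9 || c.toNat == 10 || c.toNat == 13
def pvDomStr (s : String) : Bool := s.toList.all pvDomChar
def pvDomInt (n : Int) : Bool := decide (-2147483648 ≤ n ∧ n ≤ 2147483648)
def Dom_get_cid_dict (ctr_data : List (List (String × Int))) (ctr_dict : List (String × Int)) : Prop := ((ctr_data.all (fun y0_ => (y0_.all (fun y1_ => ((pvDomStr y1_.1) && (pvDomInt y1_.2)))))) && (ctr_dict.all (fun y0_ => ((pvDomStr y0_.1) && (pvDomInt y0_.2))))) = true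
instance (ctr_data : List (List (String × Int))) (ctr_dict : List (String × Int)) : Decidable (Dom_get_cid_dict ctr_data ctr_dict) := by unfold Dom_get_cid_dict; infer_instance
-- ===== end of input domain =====

-- B replaces A's per-row read-modify-write of ctr_dict by key-level delta counting:
-- one pass builds a dict of increments keyed by the final key strings, then existing
-- keys absorb their delta (pop) and the leftover new keys are appended with one update;
-- same return value, and like A the Python B mutates and returns ctr_dict itself.


-- ===== PORT A =====
-- row['k'] is ported as (Dict.mk row).getD "k" 0; exact on Pre_ (keys present), where
-- Python's lookup returns; Python raises KeyError exactly on the inputs Pre_ excludes.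
def get_cid_dict (ctr_data : List (List (String × Int))) (ctr_dict : List (String × Int)) : List (String × Int) :=
  (ctr_data.foldl
    (fun d row =>
      let rd : PySem.Dict String Int := PySem.Dict.mk row
      let category_id := PySem.Int.toStr (rd.getD "category_id" 0)
      let pv := rd.getD "pv_show" 0
      let click := rd.getD "pv_detail" 0
      let cid_click_key := "gbdt:2:" ++ category_id ++ ":click"
      let cid_click_value_current := d.getD cid_click_key 0
      let cid_click_value := click + cid_click_value_current
      let cid_pv_key := "gbdt:2:" ++ category_id ++ ":pv"
      let cid_pv_value_current := d.getD cid_pv_key 0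
      let cid_pv_value := pv + cid_pv_value_current
      (d.insert cid_click_key cid_click_value).insert cid_pv_key cid_pv_value)
    (PySem.Dict.mk ctr_dict)).items

-- ===== PORT B =====
def get_cid_dict_alt (ctr_data : List (List (String × Int))) (ctr_dict : List (String × Int)) : List (String × Int) :=
  let delta : PySem.Dict String Int :=
    ctr_data.foldl
      (fun dl row =>
        let rd : PySem.Dict String Int := PySem.Dict.mk row
        let cid := PySem.Int.toStr (rd.getD "category_id" 0)
        [((":click" : String), ("pv_detail" : String)), ((":pv" : String), ("pv_show" : String))].foldl
          (fun dl2 sf =>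
            let key := "gbdt:2:" ++ cid ++ sf.1
            dl2.insert key (dl2.getD key 0 + rd.getD sf.2 0))
          dl)
      PySem.Dict.empty
  let d0 : PySem.Dict String Int := PySem.Dict.mk ctr_dict
  let st :=
    d0.keys.foldl
      (fun (st : PySem.Dict String Int × PySem.Dict String Int) key =>
        match st.2.pop? key with
        | some (v, rest) => (st.1.insert key (st.1.getD key 0 + v), rest)
        | none => (st.1.insert key (st.1.getD key 0 + 0), st.2))
      (d0, delta)
  (st.1.update st.2.items).items

-- ===== PRECONDITION & SPEC =====
-- Pre_: the inputs where Python A returns — every row carries the three keys A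
-- subscripts (otherwise A raises KeyError) — and ctr_dict has pairwise distinct keys:
-- a duplicate-key association list represents no Python dict under the type
-- convention (dict → assoc list), so nothing is claimed there.
def Pre_get_cid_dict (ctr_data : List (List (String × Int))) (ctr_dict : List (String × Int)) : Prop :=
  (∀ row ∈ ctr_data, "category_id" ∈ row.map Prod.fst ∧ "pv_show" ∈ row.map Prod.fst ∧ "pv_detail" ∈ row.map Prod.fst)
  ∧ (ctr_dict.map Prod.fst).Nodup
instance (ctr_data : List (List (String × Int))) (ctr_dict : List (String × Int)) : Decidable (Pre_get_cid_dict ctr_data ctr_dict) := by unfold Pre_get_cid_dict; infer_instance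
def pvWitness_get_cid_dict : (List (List (String × Int))) × (List (String × Int)) :=
  ([[("category_id", 7), ("pv_show", 3), ("pv_detail", 2)], [("category_id", 7), ("pv_show", 1), ("pv_detail", 4)]], [("gbdt:2:7:pv", 5)])
def Spec_get_cid_dict (ctr_data : List (List (String × Int))) (ctr_dict : List (String × Int)) (out : List (String × Int)) : Prop := out = get_cid_dict_alt ctr_data ctr_dict
instance (ctr_data : List (List (String × Int))) (ctr_dict : List (String × Int)) (out : List (String × Int)) : Decidable (Spec_get_cid_dict ctr_data ctr_dict out) := by unfold Spec_get_cid_dict; infer_instance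

-- ===== CLAIM (what is proved, stated in full; the proofs are below) =====
def Claim_equal_get_cid_dict : Prop := ∀ (ctr_data : List (List (String × Int))) (ctr_dict : List (String × Int)), Dom_get_cid_dict ctr_data ctr_dict → Pre_get_cid_dict ctr_data ctr_dict → Spec_get_cid_dict ctr_data ctr_dict (get_cid_dict ctr_data ctr_dict)

-- ===== LEMMAS AND PROOFS =====
-- per-key increment step: both programs are shown to be (instances of) folds of pvAddK
-- over the flat stream pvFlat of (final key, increment) pairs; pvMain characterises
-- such a fold over any nodup-key base as "update existing keys, append the new ones",
-- which is literally B's second phase (pvPhase2 + the fresh-key update).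
def pvAddK (d : PySem.Dict String Int) (kv : String × Int) : PySem.Dict String Int :=
  d.insert kv.1 (d.getD kv.1 0 + kv.2)
def pvCK (s : String) : String := "gbdt:2:" ++ s ++ ":click"
def pvPK (s : String) : String := "gbdt:2:" ++ s ++ ":pv"
def pvCid (row : List (String × Int)) : String := PySem.Int.toStr ((PySem.Dict.mk row).getD "category_id" 0)
def pvClickOf (row : List (String × Int)) : Int := (PySem.Dict.mk row).getD "pv_detail" 0
def pvPvOf (row : List (String × Int)) : Int := (PySem.Dict.mk row).getD "pv_show" 0
def pvFlat (rows : List (List (String × Int))) : List (String × Int) :=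
  rows.flatMap (fun r => [(pvCK (pvCid r), pvClickOf r), (pvPK (pvCid r), pvPvOf r)])
def pvUpd (E : PySem.Dict String Int) (p : String × Int) : String × Int := (p.1, p.2 + E.getD p.1 0)
def pvStep2 (st : PySem.Dict String Int × PySem.Dict String Int) (key : String) :
    PySem.Dict String Int × PySem.Dict String Int :=
  match st.2.pop? key with
  | some (v, rest) => (st.1.insert key (st.1.getD key 0 + v), rest)
  | none => (st.1.insert key (st.1.getD key 0 + 0), st.2)

theorem pv_getD_addfold (L : List (String × Int)) :
    ∀ (d : PySem.Dict String Int) (k : String),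
      (L.foldl pvAddK d).getD k 0 = d.getD k 0 + (L.foldl pvAddK PySem.Dict.empty).getD k 0 := by
  induction L with
  | nil => intro d k; simp [PySem.Dict.getD_empty]
  | cons x L ih =>
    intro d k
    rw [List.foldl_cons, List.foldl_cons, ih (pvAddK d x) k, ih (pvAddK PySem.Dict.empty x) k]
    have h : ∀ e : PySem.Dict String Int, (pvAddK e x).getD k 0 = e.getD k 0 + (if k = x.1 then x.2 else 0) := by
      intro e
      unfold pvAddK
      rw [PySem.Dict.getD_insert]
      split_ifs with hk
      · rw [hk]
      · omega
    rw [h, h, PySem.Dict.getD_empty]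
    ring

theorem pv_get?_erase_of_ne (d : PySem.Dict String Int) {j k : String} (h : j ≠ k) :
    (d.erase k).get? j = d.get? j := by
  obtain ⟨l⟩ := d
  simp only [PySem.Dict.erase, PySem.Dict.get?]
  congr 1
  induction l with
  | nil => rfl
  | cons p l ih =>
    by_cases hp : p.1 = k
    · have hpj : (p.1 == j) = false := by simp [hp, Ne.symm h]
      simp only [List.filter_cons, hp]
      rw [if_neg (by simp)]
      rw [List.find?_cons_of_neg (by simp [hpj])] 
      exact ih
    · simp only [List.filter_cons]
      rw [if_pos (by simp [hp])]
      by_cases hj : p.1 = j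
      · rw [List.find?_cons_of_pos (by simp [hj]), List.find?_cons_of_pos (by simp [hj])]
      · rw [List.find?_cons_of_neg (by simp [hj]), List.find?_cons_of_neg (by simp [hj])]
        exact ih

theorem pv_getD_erase_of_ne (d : PySem.Dict String Int) {j k : String} (h : j ≠ k) :
    (d.erase k).getD j 0 = d.getD j 0 := by
  rw [PySem.Dict.getD_eq_get?_getD, PySem.Dict.getD_eq_get?_getD, pv_get?_erase_of_ne d h]

theorem pvStep2_eq (d rem : PySem.Dict String Int) (k : String) :
    pvStep2 (d, rem) k = (d.insert k (d.getD k 0 + rem.getD k 0), rem.erase k) := by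
  unfold pvStep2
  cases hg : rem.get? k with
  | some v =>
    simp only [PySem.Dict.pop?, hg, Option.map_some]
    rw [PySem.Dict.getD_of_get?_eq_some rem 0 hg]
  | none =>
    simp only [PySem.Dict.pop?, hg, Option.map_none]
    rw [PySem.Dict.getD_of_get?_eq_none rem 0 hg]
    have : rem.erase k = rem := by
      apply PySem.Dict.ext
      show rem.items.filter _ = rem.items
      rw [List.filter_eq_self]
      intro p hp
      have hall : ∀ (a : String) (b : Int), (a, b) ∈ rem.items → ¬ a = k := by
        simpa [PySem.Dict.get?, Option.map_eq_none_iff, List.find?_eq_none] using hg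
      simpa using hall p.1 p.2 (by simpa using hp)
    rw [this]

theorem pvCK_ne_pvPK (s t : String) : pvCK s ≠ pvPK t := by
  intro h
  have h' := congrArg String.toList h
  simp only [pvCK, pvPK, String.toList_append] at h'
  have h2 := congrArg List.getLast? h'
  rw [List.getLast?_append_of_ne_nil _ (by decide), List.getLast?_append_of_ne_nil _ (by decide)] at h2
  exact absurd h2 (by decide)

theorem pvA_eq (ctr_data : List (List (String × Int))) (ctr_dict : List (String × Int)) :
    get_cid_dict ctr_data ctr_dict = ((pvFlat ctr_data).foldl pvAddK (PySem.Dict.mk ctr_dict)).items := by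
  unfold get_cid_dict pvFlat
  rw [List.foldl_flatMap]
  have hf : (fun (d : PySem.Dict String Int) (row : List (String × Int)) =>
      let rd : PySem.Dict String Int := PySem.Dict.mk row
      let category_id := PySem.Int.toStr (rd.getD "category_id" 0)
      let pv := rd.getD "pv_show" 0
      let click := rd.getD "pv_detail" 0
      let cid_click_key := "gbdt:2:" ++ category_id ++ ":click"
      let cid_click_value_current := d.getD cid_click_key 0
      let cid_click_value := click + cid_click_value_current
      let cid_pv_key := "gbdt:2:" ++ category_id ++ ":pv"
      let cid_pv_value_current := d.getD cid_pv_key 0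
      let cid_pv_value := pv + cid_pv_value_current
      (d.insert cid_click_key cid_click_value).insert cid_pv_key cid_pv_value)
      = (fun acc x => List.foldl pvAddK acc [(pvCK (pvCid x), pvClickOf x), (pvPK (pvCid x), pvPvOf x)]) := by
    funext d row
    simp only [List.foldl_cons, List.foldl_nil]
    unfold pvAddK pvCK pvPK pvCid pvClickOf pvPvOf
    rw [PySem.Dict.getD_insert_of_ne]
    · simp [Int.add_comm]
    · exact Ne.symm (pvCK_ne_pvPK _ _)
  rw [hf]

theorem pvB_delta (ctr_data : List (List (String × Int))) :
    (ctr_data.foldl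
      (fun dl row =>
        let rd : PySem.Dict String Int := PySem.Dict.mk row
        let cid := PySem.Int.toStr (rd.getD "category_id" 0)
        [((":click" : String), ("pv_detail" : String)), ((":pv" : String), ("pv_show" : String))].foldl
          (fun dl2 sf =>
            let key := "gbdt:2:" ++ cid ++ sf.1
            dl2.insert key (dl2.getD key 0 + rd.getD sf.2 0))
          dl)
      PySem.Dict.empty)
    = (pvFlat ctr_data).foldl pvAddK PySem.Dict.empty := by
  unfold pvFlat
  rw [List.foldl_flatMap]
  rfl

theorem pv_contains_addfold (L : List (String × Int)) :
    ∀ (d : PySem.Dict String Int) (k : String),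
      (L.foldl pvAddK d).contains k = (d.contains k || (L.foldl pvAddK PySem.Dict.empty).contains k) := by
  induction L with
  | nil => intro d k; simp [PySem.Dict.contains_empty]
  | cons x L ih =>
    intro d k
    rw [List.foldl_cons, List.foldl_cons, ih (pvAddK d x) k, ih (pvAddK PySem.Dict.empty x) k]
    unfold pvAddK
    rw [PySem.Dict.contains_insert, PySem.Dict.contains_insert, PySem.Dict.contains_empty]
    cases d.contains k <;> cases (k == x.1) <;> cases (L.foldl pvAddK PySem.Dict.empty).contains k <;> simp

theorem pvMain (L : List (String × Int)) (base : PySem.Dict String Int) (hnd : base.keys.Nodup) :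
    (L.foldl pvAddK base).items
      = base.items.map (pvUpd (L.foldl pvAddK PySem.Dict.empty))
        ++ (L.foldl pvAddK PySem.Dict.empty).items.filter (fun p => !(base.contains p.1)) := by
  induction L using List.reverseRecOn with
  | nil =>
    simp only [List.foldl_nil]
    have : PySem.Dict.empty.items = ([] : List (String × Int)) := rfl
    rw [this]
    simp only [List.filter_nil, List.append_nil]
    conv_lhs => rw [← List.map_id base.items]
    exact List.map_congr_left (fun p _ => by simp [pvUpd, PySem.Dict.getD_empty])
  | append_singleton L x ih =>
    simp only [List.foldl_append, List.foldl_cons, List.foldl_nil]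
    set E := L.foldl pvAddK PySem.Dict.empty with hE
    set F := L.foldl pvAddK base with hF
    have hgF : F.getD x.1 0 = base.getD x.1 0 + E.getD x.1 0 := pv_getD_addfold L base x.1
    have hcF : F.contains x.1 = (base.contains x.1 || E.contains x.1) := pv_contains_addfold L base x.1
    have hmemb : ∀ p ∈ base.items, base.contains p.1 = true := by
      intro p hp
      exact List.any_eq_true.mpr ⟨p, hp, by simp⟩
    by_cases hb : base.contains x.1 = true
    · -- x.1 is an original key of base
      have hcF' : F.contains x.1 = true := by rw [hcF, hb, Bool.true_or]
      rw [show pvAddK F x = F.insert x.1 (F.getD x.1 0 + x.2) from rfl,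
          PySem.Dict.items_insert_of_contains F _ hcF', ih, List.map_append]
      congr 1
      · -- updated part over base.items
        rw [List.map_map]
        refine List.map_congr_left (fun p hp => ?_)
        simp only [Function.comp_apply, pvUpd]
        by_cases hpk : p.1 = x.1
        · rw [if_pos (by simp [hpk])]
          have hbv : base.getD x.1 0 = p.2 := by
            rw [← hpk]
            exact PySem.Dict.getD_of_mem_items base (by simpa using hp) hnd 0
          rw [show pvAddK E x = E.insert x.1 (E.getD x.1 0 + x.2) from rfl,
              hpk, PySem.Dict.getD_insert_self, hgF, hbv]
          have : p.2 + E.getD x.1 0 + x.2 = p.2 + (E.getD x.1 0 + x.2) := by ring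
          rw [← this]
        · rw [if_neg (by simp [hpk])]
          rw [show pvAddK E x = E.insert x.1 (E.getD x.1 0 + x.2) from rfl,
              PySem.Dict.getD_insert_of_ne E _ _ hpk]
      · -- new-keys part
        have hflt : ∀ p ∈ E.items.filter (fun p => !(base.contains p.1)), p.1 ≠ x.1 := by
          intro p hp hpe
          have := (List.mem_filter.mp hp).2
          rw [hpe, hb] at this
          simp at this
        have hmapid : (E.items.filter (fun p => !(base.contains p.1))).map
            (fun p => if (p.1 == x.1) = true then (x.1, F.getD x.1 0 + x.2) else p)
            = E.items.filter (fun p => !(base.contains p.1)) := by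
          conv_rhs => rw [← List.map_id (E.items.filter (fun p => !(base.contains p.1)))]
          exact List.map_congr_left (fun p hp => by rw [if_neg (by simp [hflt p hp])]; rfl)
        rw [hmapid]
        by_cases he : E.contains x.1 = true
        · rw [show pvAddK E x = E.insert x.1 (E.getD x.1 0 + x.2) from rfl,
              PySem.Dict.items_insert_of_contains E _ he, List.filter_map]
          have : (E.items.filter ((fun p => !(base.contains p.1)) ∘
              (fun p => if (p.1 == x.1) = true then (x.1, E.getD x.1 0 + x.2) else p)))
              = E.items.filter (fun p => !(base.contains p.1)) := by
            refine List.filter_congr (fun p hp => ?_)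
            simp only [Function.comp_apply]
            by_cases hpk : p.1 = x.1
            · rw [if_pos (by simp [hpk]), hpk]
            · rw [if_neg (by simp [hpk])]
          rw [this]
          conv_lhs => rw [← List.map_id (E.items.filter (fun p => !(base.contains p.1)))]
          refine (List.map_congr_left (fun p hp => ?_)).symm
          rw [if_neg (by simp [hflt p hp])]
          rfl
        · rw [show pvAddK E x = E.insert x.1 (E.getD x.1 0 + x.2) from rfl,
              PySem.Dict.items_insert_of_not_contains E _ (by simpa using he), List.filter_append]
          have : [((x.1 : String), E.getD x.1 0 + x.2)].filter (fun p => !(base.contains p.1)) = [] := by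
            simp [hb]
          rw [this, List.append_nil]
    · -- x.1 is a new key, absent from base
      have hb' : base.contains x.1 = false := by simpa using hb
      have hpart1 : base.items.map (pvUpd (pvAddK E x)) = base.items.map (pvUpd E) := by
        refine List.map_congr_left (fun p hp => ?_)
        have hpk : p.1 ≠ x.1 := by
          intro hpe
          rw [← hpe, hmemb p hp] at hb'
          simp at hb'
        simp only [pvUpd]
        rw [show pvAddK E x = E.insert x.1 (E.getD x.1 0 + x.2) from rfl,
            PySem.Dict.getD_insert_of_ne E _ _ hpk]
      rw [hpart1]
      by_cases he : E.contains x.1 = true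
      · have hcF' : F.contains x.1 = true := by rw [hcF, he, Bool.or_true]
        rw [show pvAddK F x = F.insert x.1 (F.getD x.1 0 + x.2) from rfl,
            PySem.Dict.items_insert_of_contains F _ hcF', ih, List.map_append]
        congr 1
        · rw [List.map_map]
          refine List.map_congr_left (fun p hp => ?_)
          have hpk : p.1 ≠ x.1 := by
            intro hpe
            rw [← hpe, hmemb p hp] at hb'
            simp at hb'
          simp only [Function.comp_apply]
          rw [if_neg (by simp [pvUpd, hpk])]
        · rw [show pvAddK E x = E.insert x.1 (E.getD x.1 0 + x.2) from rfl,
              PySem.Dict.items_insert_of_contains E _ he, List.filter_map]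
          have : (E.items.filter ((fun p => !(base.contains p.1)) ∘
              (fun p => if (p.1 == x.1) = true then (x.1, E.getD x.1 0 + x.2) else p)))
              = E.items.filter (fun p => !(base.contains p.1)) := by
            refine List.filter_congr (fun p hp => ?_)
            simp only [Function.comp_apply]
            by_cases hpk : p.1 = x.1
            · rw [if_pos (by simp [hpk]), hpk]
            · rw [if_neg (by simp [hpk])]
          rw [this]
          refine List.map_congr_left (fun p hp => ?_)
          by_cases hpk : p.1 = x.1
          · rw [if_pos (by simp [hpk]), if_pos (by simp [hpk])]
            rw [hgF, PySem.Dict.getD_of_not_contains base 0 hb', Int.zero_add]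
          · rw [if_neg (by simp [hpk]), if_neg (by simp [hpk])]
      · have he' : E.contains x.1 = false := by simpa using he
        have hcF' : F.contains x.1 = false := by rw [hcF, hb', he']; rfl
        rw [show pvAddK F x = F.insert x.1 (F.getD x.1 0 + x.2) from rfl,
            PySem.Dict.items_insert_of_not_contains F _ hcF', ih,
            show pvAddK E x = E.insert x.1 (E.getD x.1 0 + x.2) from rfl,
            PySem.Dict.items_insert_of_not_contains E _ he', List.filter_append]
        have h1 : [((x.1 : String), E.getD x.1 0 + x.2)].filter (fun p => !(base.contains p.1))
            = [(x.1, E.getD x.1 0 + x.2)] := by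
          simp [hb']
        rw [h1, hgF, PySem.Dict.getD_of_not_contains base 0 hb',
            PySem.Dict.getD_of_not_contains E 0 he', List.append_assoc, Int.zero_add]

theorem pvPhase2 (ks : List String) :
    ∀ (d rem : PySem.Dict String Int), ks.Nodup → (∀ k ∈ ks, d.contains k = true) → d.keys.Nodup →
      (ks.foldl pvStep2 (d, rem)).1.items
          = d.items.map (fun p => if p.1 ∈ ks then (p.1, p.2 + rem.getD p.1 0) else p)
      ∧ (ks.foldl pvStep2 (d, rem)).2.items
          = rem.items.filter (fun p => !(decide (p.1 ∈ ks))) := by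
  induction ks with
  | nil =>
    intro d rem _ _ _
    constructor
    · simp
    · simp
  | cons k ks ih =>
    intro d rem hnd hcont hkeys
    have hdc : d.contains k = true := hcont k List.mem_cons_self
    have hknotin : k ∉ ks := (List.nodup_cons.mp hnd).1
    rw [List.foldl_cons, pvStep2_eq]
    obtain ⟨h1, h2⟩ := ih (d.insert k (d.getD k 0 + rem.getD k 0)) (rem.erase k)
      (List.nodup_cons.mp hnd).2
      (fun j hj => by rw [PySem.Dict.contains_insert, hcont j (List.mem_cons_of_mem _ hj), Bool.or_true])
      (PySem.Dict.nodup_keys_insert d k _ hkeys)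
    constructor
    · rw [h1, PySem.Dict.items_insert_of_contains d _ hdc, List.map_map]
      refine List.map_congr_left (fun p hp => ?_)
      simp only [Function.comp_apply]
      by_cases hpk : p.1 = k
      · have hdv : d.getD k 0 = p.2 := by
          rw [← hpk]
          exact PySem.Dict.getD_of_mem_items d (by simpa using hp) hkeys 0
        simp [hpk, hknotin, hdv]
      · have hb : (p.1 == k) = false := by simp [hpk]
        simp only [hb, Bool.false_eq_true, if_false]
        by_cases hpm : p.1 ∈ ks
        · rw [if_pos hpm, if_pos (List.mem_cons_of_mem _ hpm), pv_getD_erase_of_ne rem hpk]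
        · rw [if_neg hpm, if_neg (by simp [List.mem_cons, hpk, hpm])]
    · rw [h2]
      have : (rem.erase k).items = rem.items.filter (fun p => !(p.1 == k)) := rfl
      rw [this, List.filter_filter]
      refine List.filter_congr (fun p hp => ?_)
      by_cases h : p.1 = k <;> by_cases h2 : p.1 ∈ ks <;> simp [h, h2]

theorem pvB_eq (ctr_data : List (List (String × Int))) (ctr_dict : List (String × Int))
    (hnd : (ctr_dict.map Prod.fst).Nodup) :
    get_cid_dict_alt ctr_data ctr_dict
      = (PySem.Dict.mk ctr_dict).items.map (pvUpd ((pvFlat ctr_data).foldl pvAddK PySem.Dict.empty))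
        ++ ((pvFlat ctr_data).foldl pvAddK PySem.Dict.empty).items.filter
            (fun p => !((PySem.Dict.mk ctr_dict).contains p.1)) := by
  have hstep : (fun (st : PySem.Dict String Int × PySem.Dict String Int) key =>
      match st.2.pop? key with
      | some (v, rest) => (st.1.insert key (st.1.getD key 0 + v), rest)
      | none => (st.1.insert key (st.1.getD key 0 + 0), st.2)) = pvStep2 := rfl
  have h0 : get_cid_dict_alt ctr_data ctr_dict
      = ((((PySem.Dict.mk ctr_dict).keys.foldl pvStep2
            (PySem.Dict.mk ctr_dict, (pvFlat ctr_data).foldl pvAddK PySem.Dict.empty)).1.update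
          (((PySem.Dict.mk ctr_dict).keys.foldl pvStep2
            (PySem.Dict.mk ctr_dict, (pvFlat ctr_data).foldl pvAddK PySem.Dict.empty)).2.items))).items := by
    unfold get_cid_dict_alt
    rw [pvB_delta, hstep]
  rw [h0]
  set E := (pvFlat ctr_data).foldl pvAddK PySem.Dict.empty with hE
  set d0 : PySem.Dict String Int := PySem.Dict.mk ctr_dict with hd0
  have hnd0 : d0.keys.Nodup := hnd
  have hcont : ∀ k ∈ d0.keys, d0.contains k = true := fun k hk =>
    (PySem.Dict.contains_iff_mem_keys d0 k).mpr hk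
  obtain ⟨h1, h2⟩ := pvPhase2 d0.keys d0 E hnd0 hcont hnd0
  have hEnd : E.keys.Nodup := by
    rw [hE]
    exact PySem.Dict.nodup_keys_foldl_insert_key (pvFlat ctr_data) Prod.fst
      (fun d kv => d.getD kv.1 0 + kv.2) PySem.Dict.empty PySem.Dict.nodup_keys_empty
  have h1' : ((d0.keys.foldl pvStep2 (d0, E)).1).items = d0.items.map (pvUpd E) := by
    rw [h1]
    refine List.map_congr_left (fun p hp => ?_)
    rw [if_pos (show p.1 ∈ d0.keys from List.mem_map.mpr ⟨p, hp, rfl⟩)]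
    rfl
  have h2' : ((d0.keys.foldl pvStep2 (d0, E)).2).items
      = E.items.filter (fun p => !(d0.contains p.1)) := by
    rw [h2]
    refine List.filter_congr (fun p hp => ?_)
    rw [PySem.Dict.contains_eq_decide_mem_keys]
  have hfresh : ∀ a ∈ ((d0.keys.foldl pvStep2 (d0, E)).2).items,
      ((d0.keys.foldl pvStep2 (d0, E)).1).contains a.1 = false := by
    intro a ha
    rw [h2'] at ha
    have hnc : d0.contains a.1 = false := by
      have := (List.mem_filter.mp ha).2
      simpa using this
    show ((d0.keys.foldl pvStep2 (d0, E)).1).items.any (fun p => p.1 == a.1) = false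
    rw [h1', List.any_map]
    have : ((fun p => p.1 == a.1) ∘ pvUpd E) = fun (p : String × Int) => p.1 == a.1 := by
      funext p
      rfl
    rw [this]
    exact hnc
  have hnd2 : (((d0.keys.foldl pvStep2 (d0, E)).2).items.map Prod.fst).Nodup := by
    rw [h2']
    exact List.Nodup.sublist (List.filter_sublist.map Prod.fst) hEnd
  have hupd : ((d0.keys.foldl pvStep2 (d0, E)).1.update
      ((d0.keys.foldl pvStep2 (d0, E)).2.items)).items
      = ((d0.keys.foldl pvStep2 (d0, E)).1).items
        ++ ((d0.keys.foldl pvStep2 (d0, E)).2).items.map (fun a => (a.1, a.2)) := by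
    exact PySem.Dict.items_foldl_insert_fresh _ Prod.fst Prod.snd _ hfresh hnd2
  rw [hupd, h1', h2']
  congr 1
  conv_rhs => rw [← List.map_id (E.items.filter (fun p => !(d0.contains p.1)))]
  exact List.map_congr_left (fun p _ => rfl)

-- ===== VERDICT (by name: the statement is the Claim_ definition above) =====
theorem get_cid_dict_spec : Claim_equal_get_cid_dict := by
  intro ctr_data ctr_dict _ hpre
  unfold Spec_get_cid_dict
  rw [pvA_eq, pvB_eq ctr_data ctr_dict hpre.2]
  exact pvMain (pvFlat ctr_data) (PySem.Dict.mk ctr_dict) hpre.2
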